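-- pv_equiv track=rewrite | github.com/Martin-E-Karlsson/Advent-of-Code | 2021/day10/app.py | find_illegal_chacters
-- ===== SOURCE A (Python) =====
-- RightList = [')', ']', '}', '>']
--
-- PairList = ['()', '[]', '{}', '<>']
--
-- def find_illegal_chacters(line):
--     for index, char in enumerate(line):
--         if char in RightList:
--             slice = line[:index+1]
--             pairFound = True
--             while pairFound:
--                 pairFound = False
--                 for pair in PairList:
--                     if pair in slice:
--                         slice = slice.replace(pair, '')
--                         pairFound = True
--             if slice and slice[-1] in RightList:
--                 return char
--     return ''
-- ===== SOURCE B (Python) =====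
-- PAIRS = {')': '(', ']': '[', '}': '{', '>': '<'}
--
-- def find_illegal_chacters(line):
--     stack = []
--     for ch in line:
--         if ch in PAIRS:
--             if stack and stack[-1] == PAIRS[ch]:
--                 stack.pop()
--             else:
--                 return ch
--         else:
--             stack.append(ch)
--     return ''
-- ===== Notes on version B (the rewrite author's own statement) =====
-- stated objective: alternative
-- what changed: Replaced the per-index prefix-slice with repeated replace-until-fixpoint pair elimination by a single left-to-right stack pass that matches each closing bracket against the top of the stack.
import Mathlib
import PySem

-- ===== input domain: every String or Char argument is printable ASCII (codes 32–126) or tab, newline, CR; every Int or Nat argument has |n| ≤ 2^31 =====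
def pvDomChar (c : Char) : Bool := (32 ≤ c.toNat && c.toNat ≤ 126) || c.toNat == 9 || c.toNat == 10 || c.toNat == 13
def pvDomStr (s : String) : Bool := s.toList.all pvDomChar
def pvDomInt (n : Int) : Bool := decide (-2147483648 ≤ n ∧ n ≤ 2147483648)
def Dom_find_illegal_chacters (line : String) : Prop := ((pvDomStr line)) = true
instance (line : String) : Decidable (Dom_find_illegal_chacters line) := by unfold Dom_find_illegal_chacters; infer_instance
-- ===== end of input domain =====

-- B replaces A's per-index prefix slicing with repeated replace-until-fixpoint pair deletion
-- by a single left-to-right stack pass (objective: alternative algorithm).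

-- ===== PORT A =====
def pvRightList : List Char := [')', ']', '}', '>']

def pvPairList : List (List Char) := [['(', ')'], ['[', ']'], ['{', '}'], ['<', '>']]

-- one iteration of A's `while pairFound:` body (the `for pair in PairList` loop)
def pvReducePass (s : List Char) : List Char × Bool :=
  pvPairList.foldl
    (fun st pair =>
      if PySem.Chars.isIn pair st.1 then (PySem.Chars.replace st.1 pair [], true) else st)
    (s, false)

-- termination facts for A's while loop (cited by `decreasing_by` below)
lemma pvReplaceGo_len_le (pair : List Char) :
    ∀ (fuel : Nat) (l acc : List Char),
      (PySem.Chars.replace.go pair [] fuel l acc).length ≤ acc.length + l.length := by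
  intro fuel
  induction fuel with
  | zero => intro l acc; simp [PySem.Chars.replace.go]
  | succ f IH =>
    intro l acc
    cases l with
    | nil => simp [PySem.Chars.replace.go]
    | cons c t =>
      rw [PySem.Chars.replace.go]
      by_cases hp : pair.isPrefixOf (c :: t) = true
      · rw [if_pos hp]
        have := IH (List.drop pair.length (c :: t)) acc
        have hd : (List.drop pair.length (c :: t)).length ≤ (c :: t).length := by
          simp [List.length_drop]
        simp only [List.reverse_nil, List.nil_append] at this ⊢
        omega
      · rw [if_neg hp]
        have := IH t (c :: acc)
        simp at this ⊢
        omega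

lemma pvReplaceGo_len_lt (pair : List Char) (hne : pair ≠ []) :
    ∀ (fuel : Nat) (l acc : List Char), pair <:+: l → l.length ≤ fuel →
      (PySem.Chars.replace.go pair [] fuel l acc).length < acc.length + l.length := by
  intro fuel
  induction fuel with
  | zero =>
    intro l acc hinf hlen
    have : l = [] := by cases l <;> simp_all
    subst this
    exact absurd (List.eq_nil_of_infix_nil hinf) hne
  | succ f IH =>
    intro l acc hinf hlen
    cases l with
    | nil => exact absurd (List.eq_nil_of_infix_nil hinf) hne
    | cons c t =>
      rw [PySem.Chars.replace.go]
      by_cases hp : pair.isPrefixOf (c :: t) = true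
      · rw [if_pos hp]
        have hple : 1 ≤ pair.length := by cases pair <;> simp_all
        have := pvReplaceGo_len_le pair f (List.drop pair.length (c :: t)) acc
        have hd : (List.drop pair.length (c :: t)).length = (c :: t).length - pair.length := by
          simp [List.length_drop]
        simp only [List.reverse_nil, List.nil_append] at this ⊢
        simp only [List.length_cons] at *
        omega
      · rw [if_neg hp]
        have hpre : ¬ pair <+: (c :: t) := by
          intro h; exact hp (List.isPrefixOf_iff_prefix.mpr h)
        have hinft : pair <:+: t := by
          rcases List.infix_cons_iff.mp hinf with h | h
          · exact absurd h hpre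
          · exact h
        have := IH t (c :: acc) hinft (by simpa using Nat.lt_succ_iff.mp (by simpa using hlen))
        simp only [List.length_cons] at *
        omega

lemma pvReplace_len_lt (s pair : List Char) (hne : pair ≠ [])
    (h : PySem.Chars.isIn pair s = true) :
    (PySem.Chars.replace s pair []).length < s.length := by
  have hinf : pair <:+: s := (PySem.Chars.isIn_iff_infix _ _).mp h
  rw [PySem.Chars.replace]
  simp only [List.isEmpty_iff]
  rw [if_neg hne]
  have := pvReplaceGo_len_lt pair hne s.length s [] hinf le_rfl
  simpa using this

lemma pvPassAux_len :
    ∀ (ps : List (List Char)), (∀ p ∈ ps, p ≠ []) → ∀ (st : List Char × Bool),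
      (ps.foldl (fun st pair =>
          if PySem.Chars.isIn pair st.1 then (PySem.Chars.replace st.1 pair [], true) else st) st).1.length ≤ st.1.length ∧
      ((ps.foldl (fun st pair =>
          if PySem.Chars.isIn pair st.1 then (PySem.Chars.replace st.1 pair [], true) else st) st).2 = true →
        st.2 = true ∨
        (ps.foldl (fun st pair =>
          if PySem.Chars.isIn pair st.1 then (PySem.Chars.replace st.1 pair [], true) else st) st).1.length < st.1.length) := by
  intro ps
  induction ps with
  | nil => intro _ st; simp
  | cons p ps IH =>
    intro hps st
    have hp : p ≠ [] := hps p (by simp)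
    have hps' : ∀ q ∈ ps, q ≠ [] := fun q hq => hps q (by simp [hq])
    simp only [List.foldl_cons]
    by_cases h : PySem.Chars.isIn p st.1 = true
    · rw [if_pos h]
      have hlt := pvReplace_len_lt st.1 p hp h
      rcases IH hps' (PySem.Chars.replace st.1 p [], true) with ⟨h1, _⟩
      simp only at h1
      constructor
      · omega
      · intro _; right; omega
    · rw [if_neg h]
      exact IH hps' st

lemma pvReducePass_lt (s : List Char) (h : (pvReducePass s).2 = true) :
    (pvReducePass s).1.length < s.length := by
  have := pvPassAux_len pvPairList (by decide) (s, false)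
  rcases this with ⟨_, h2⟩
  rcases h2 h with h | h
  · simp at h
  · exact h

-- A's `while pairFound:` loop
def pvReduce (s : List Char) : List Char :=
  if h : (pvReducePass s).2 = true then pvReduce (pvReducePass s).1 else (pvReducePass s).1
termination_by s.length
decreasing_by exact pvReducePass_lt s h

-- A's `for index, char in enumerate(line):` loop
def pvALoop (lineC : List Char) : List (Int × Char) → String
  | [] => ""
  | (index, char) :: rest =>
    if pvRightList.contains char then
      let sl := pvReduce (PySem.List.slice lineC none (some (index + 1)))
      if (!sl.isEmpty) && (PySem.List.pyGet? sl (-1)).any (fun x => pvRightList.contains x) then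
        String.ofList [char]
      else pvALoop lineC rest
    else pvALoop lineC rest

def find_illegal_chacters (line : String) : String :=
  pvALoop line.toList (PySem.List.enumerate line.toList 0)

-- ===== PORT B =====
def pvPAIRS : PySem.Dict Char Char :=
  PySem.Dict.mk [(')', '('), (']', '['), ('}', '{'), ('>', '<')]

def pvBLoop (stack : List Char) : List Char → String
  | [] => ""
  | ch :: rest =>
    if pvPAIRS.contains ch then
      if (!stack.isEmpty) && (stack.getLast? == pvPAIRS.get? ch) then
        pvBLoop stack.dropLast rest
      else String.ofList [ch]
    else pvBLoop (stack ++ [ch]) rest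

def find_illegal_chacters_alt (line : String) : String :=
  pvBLoop [] line.toList

-- ===== PRECONDITION & SPEC =====
def Spec_find_illegal_chacters (line : String) (out : String) : Prop := out = find_illegal_chacters_alt line
instance (line : String) (out : String) : Decidable (Spec_find_illegal_chacters line out) := by unfold Spec_find_illegal_chacters; infer_instance

-- ===== CLAIM (what is proved, stated in full; the proofs are below) =====
def Claim_equal_find_illegal_chacters : Prop := ∀ (line : String), Dom_find_illegal_chacters line → Spec_find_illegal_chacters line (find_illegal_chacters line)

-- ===== LEMMAS AND PROOFS =====

-- proof-side stack step: what B's loop does to the stack, and the normal form of pair deletion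
def pvStep (acc : List Char) (c : Char) : List Char :=
  match pvPAIRS.get? c with
  | some o => if acc.getLast? = some o then acc.dropLast else acc ++ [c]
  | none => acc ++ [c]

def pvNorm (s : List Char) : List Char := List.foldl pvStep [] s

lemma pvKey_cases (c : Char) :
    (pvPAIRS.get? c = none ∧ pvPAIRS.contains c = false ∧ pvRightList.contains c = false ∧
      c ∉ pvRightList) ∨
    (∃ o, pvPAIRS.get? c = some o ∧ pvPAIRS.contains c = true ∧ pvRightList.contains c = true ∧
      c ∈ pvRightList ∧ [o, c] ∈ pvPairList ∧ pvPAIRS.get? o = none) := by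
  by_cases h1 : c = ')'
  · subst h1; right; exact ⟨'(', by decide⟩
  by_cases h2 : c = ']'
  · subst h2; right; exact ⟨'[', by decide⟩
  by_cases h3 : c = '}'
  · subst h3; right; exact ⟨'{', by decide⟩
  by_cases h4 : c = '>'
  · subst h4; right; exact ⟨'<', by decide⟩
  · left
    have hb1 : (((')') : Char) == c) = false := beq_eq_false_iff_ne.mpr (Ne.symm h1)
    have hb2 : (((']') : Char) == c) = false := beq_eq_false_iff_ne.mpr (Ne.symm h2)
    have hb3 : ((('}') : Char) == c) = false := beq_eq_false_iff_ne.mpr (Ne.symm h3)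
    have hb4 : ((('>') : Char) == c) = false := beq_eq_false_iff_ne.mpr (Ne.symm h4)
    have hget : pvPAIRS.get? c = none := by
      rw [pvPAIRS]
      rw [PySem.Dict.get?_mk_cons, hb1, if_neg (by simp)]
      rw [PySem.Dict.get?_mk_cons, hb2, if_neg (by simp)]
      rw [PySem.Dict.get?_mk_cons, hb3, if_neg (by simp)]
      rw [PySem.Dict.get?_mk_cons, hb4, if_neg (by simp)]
      rfl
    have hnm : c ∉ pvRightList := by simp [pvRightList, h1, h2, h3, h4]
    exact ⟨hget, by rw [PySem.Dict.contains_eq_isSome_get?, hget]; rfl,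
      by simpa using hnm, hnm⟩

lemma pvStep_none (acc : List Char) (c : Char) (h : pvPAIRS.get? c = none) :
    pvStep acc c = acc ++ [c] := by
  unfold pvStep; rw [h]

lemma pvStep_some (acc : List Char) (c o : Char) (h : pvPAIRS.get? c = some o) :
    pvStep acc c = if acc.getLast? = some o then acc.dropLast else acc ++ [c] := by
  unfold pvStep; rw [h]

lemma pvNorm_append_one (s : List Char) (c : Char) :
    pvNorm (s ++ [c]) = pvStep (pvNorm s) c := by
  simp [pvNorm, List.foldl_append]

lemma pvStep_cancel (o c : Char) (ho : pvPAIRS.get? o = none) (hc : pvPAIRS.get? c = some o) :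
    ∀ (init v : List Char),
      List.foldl pvStep init ([o, c] ++ v) = List.foldl pvStep init v := by
  intro init v
  have h1 : pvStep init o = init ++ [o] := pvStep_none init o ho
  have h2 : pvStep (init ++ [o]) c = init := by
    rw [pvStep_some _ _ _ hc, if_pos (by simp), List.dropLast_concat]
  simp [List.foldl_cons, h1, h2]

lemma pvGo_foldl (pair : List Char)
    (hcancel : ∀ (init v : List Char),
      List.foldl pvStep init (pair ++ v) = List.foldl pvStep init v) :
    ∀ (fuel : Nat) (l acc init : List Char),
      List.foldl pvStep init (PySem.Chars.replace.go pair [] fuel l acc) =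
        List.foldl pvStep init (acc.reverse ++ l) := by
  intro fuel
  induction fuel with
  | zero => intro l acc init; simp [PySem.Chars.replace.go]
  | succ f IH =>
    intro l acc init
    cases l with
    | nil => simp [PySem.Chars.replace.go]
    | cons c t =>
      rw [PySem.Chars.replace.go]
      by_cases hp : pair.isPrefixOf (c :: t) = true
      · rw [if_pos hp]
        simp only [List.reverse_nil, List.nil_append]
        rcases List.isPrefixOf_iff_prefix.mp hp with ⟨v, hv⟩
        rw [IH]
        have hd : List.drop pair.length (c :: t) = v := by
          rw [← hv]; simp
        rw [hd, ← hv, List.foldl_append, List.foldl_append, hcancel]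
      · rw [if_neg hp]
        rw [IH]
        simp [List.foldl_append]

lemma pvReplace_foldl (pair : List Char) (hne : pair ≠ [])
    (hcancel : ∀ (init v : List Char),
      List.foldl pvStep init (pair ++ v) = List.foldl pvStep init v) (s init : List Char) :
    List.foldl pvStep init (PySem.Chars.replace s pair []) = List.foldl pvStep init s := by
  rw [PySem.Chars.replace]
  simp only [List.isEmpty_iff]
  rw [if_neg hne]
  simpa using pvGo_foldl pair hcancel s.length s [] init

lemma pvPair_cancel : ∀ p ∈ pvPairList, p ≠ [] ∧
    ∀ (init v : List Char), List.foldl pvStep init (p ++ v) = List.foldl pvStep init v := by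
  intro p hp
  fin_cases hp
  · exact ⟨by decide, pvStep_cancel '(' ')' (by decide) (by decide)⟩
  · exact ⟨by decide, pvStep_cancel '[' ']' (by decide) (by decide)⟩
  · exact ⟨by decide, pvStep_cancel '{' '}' (by decide) (by decide)⟩
  · exact ⟨by decide, pvStep_cancel '<' '>' (by decide) (by decide)⟩

lemma pvPassAux_foldl :
    ∀ (ps : List (List Char)),
      (∀ p ∈ ps, p ≠ [] ∧
        ∀ (init v : List Char), List.foldl pvStep init (p ++ v) = List.foldl pvStep init v) →
      ∀ (st : List Char × Bool) (init : List Char),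
        List.foldl pvStep init
          ((ps.foldl (fun st pair =>
            if PySem.Chars.isIn pair st.1 then (PySem.Chars.replace st.1 pair [], true) else st) st).1) =
        List.foldl pvStep init st.1 := by
  intro ps
  induction ps with
  | nil => intro _ st init; simp
  | cons p ps IH =>
    intro hps st init
    rcases hps p (by simp) with ⟨hne, hcancel⟩
    have hps' : ∀ q ∈ ps, q ≠ [] ∧
        ∀ (init v : List Char), List.foldl pvStep init (q ++ v) = List.foldl pvStep init v :=
      fun q hq => hps q (List.mem_cons_of_mem _ hq)
    simp only [List.foldl_cons]
    by_cases h : PySem.Chars.isIn p st.1 = true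
    · rw [if_pos h]
      rw [IH hps' (PySem.Chars.replace st.1 p [], true) init]
      exact pvReplace_foldl p hne hcancel st.1 init
    · rw [if_neg h]
      exact IH hps' st init

lemma pvReducePass_foldl (s init : List Char) :
    List.foldl pvStep init (pvReducePass s).1 = List.foldl pvStep init s := by
  exact pvPassAux_foldl pvPairList pvPair_cancel (s, false) init

lemma pvPassAux_flagMono :
    ∀ (ps : List (List Char)) (st : List Char × Bool), st.2 = true →
      (ps.foldl (fun st pair =>
        if PySem.Chars.isIn pair st.1 then (PySem.Chars.replace st.1 pair [], true) else st) st).2 = true := by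
  intro ps
  induction ps with
  | nil => intro st h; simpa using h
  | cons p ps IH =>
    intro st h
    simp only [List.foldl_cons]
    by_cases hi : PySem.Chars.isIn p st.1 = true
    · rw [if_pos hi]; exact IH _ rfl
    · rw [if_neg hi]; exact IH _ h

lemma pvPassAux_false :
    ∀ (ps : List (List Char)) (st : List Char × Bool),
      (ps.foldl (fun st pair =>
        if PySem.Chars.isIn pair st.1 then (PySem.Chars.replace st.1 pair [], true) else st) st).2 = false →
      (ps.foldl (fun st pair =>
        if PySem.Chars.isIn pair st.1 then (PySem.Chars.replace st.1 pair [], true) else st) st).1 = st.1 ∧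
      ∀ p ∈ ps, PySem.Chars.isIn p st.1 = false := by
  intro ps
  induction ps with
  | nil => intro st _; simp
  | cons p ps IH =>
    intro st h
    simp only [List.foldl_cons] at h ⊢
    by_cases hi : PySem.Chars.isIn p st.1 = true
    · exfalso
      rw [if_pos hi] at h
      have := pvPassAux_flagMono ps (PySem.Chars.replace st.1 p [], true) rfl
      rw [this] at h
      simp at h
    · rw [if_neg hi] at h ⊢
      rcases IH st h with ⟨h1, h2⟩
      refine ⟨h1, ?_⟩
      intro q hq
      rcases List.mem_cons.mp hq with rfl | hq'
      · simpa using hi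
      · exact h2 q hq'

lemma pvReduce_spec (s : List Char) :
    (∀ p ∈ pvPairList, PySem.Chars.isIn p (pvReduce s) = false) ∧
    ∀ init, List.foldl pvStep init (pvReduce s) = List.foldl pvStep init s := by
  induction s using pvReduce.induct with
  | case1 s h IH =>
    rw [pvReduce, dif_pos h]
    rcases IH with ⟨ih1, ih2⟩
    refine ⟨ih1, fun init => ?_⟩
    rw [ih2 init, pvReducePass_foldl]
  | case2 s h =>
    rw [pvReduce, dif_neg h]
    have hf : (pvReducePass s).2 = false := by
      cases hb : (pvReducePass s).2
      · rfl
      · exact absurd hb h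
    have hpf := pvPassAux_false pvPairList (s, false) hf
    have h1 : (pvReducePass s).1 = s := hpf.1
    have h2 : ∀ p ∈ pvPairList, PySem.Chars.isIn p s = false := hpf.2
    refine ⟨?_, fun init => by rw [pvReducePass_foldl]⟩
    intro p hp
    rw [h1]
    exact h2 p hp

lemma pvNorm_pairfree (t : List Char)
    (h : ∀ p ∈ pvPairList, PySem.Chars.isIn p t = false) : pvNorm t = t := by
  induction t using List.reverseRecOn with
  | nil => rfl
  | append_singleton s c IH =>
    have hs : ∀ p ∈ pvPairList, PySem.Chars.isIn p s = false := by
      intro p hp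
      cases hps : PySem.Chars.isIn p s
      · rfl
      · exfalso
        have hinf := (PySem.Chars.isIn_iff_infix _ _).mp hps
        have : PySem.Chars.isIn p (s ++ [c]) = true :=
          (PySem.Chars.isIn_iff_infix _ _).mpr (List.infix_append_of_infix_left hinf)
        rw [h p hp] at this
        simp at this
    rw [pvNorm_append_one, IH hs]
    rcases pvKey_cases c with ⟨hn, _, _, _⟩ | ⟨o, hc, _, _, _, hmem, _⟩
    · exact pvStep_none s c hn
    · rw [pvStep_some _ _ _ hc]
      by_cases hl : s.getLast? = some o
      · exfalso
        rcases List.getLast?_eq_some_iff.mp hl with ⟨s', rfl⟩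
        have : PySem.Chars.isIn [o, c] (s' ++ [o] ++ [c]) = true := by
          rw [PySem.Chars.isIn_iff_infix]
          exact ⟨s', [], by simp⟩
        rw [h [o, c] hmem] at this
        simp at this
      · rw [if_neg hl]

lemma pvReduce_eq_norm (s : List Char) : pvReduce s = pvNorm s := by
  rcases pvReduce_spec s with ⟨h1, h2⟩
  calc pvReduce s = pvNorm (pvReduce s) := (pvNorm_pairfree _ h1).symm
    _ = pvNorm s := h2 []

-- A's end-of-prefix test is false on a stack that holds no closing bracket
lemma pvNoClose (sl : List Char) (h : ∀ x ∈ sl, pvPAIRS.contains x = false) :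
    ((!sl.isEmpty) && (PySem.List.pyGet? sl (-1)).any (fun x => pvRightList.contains x)) = false := by
  cases hsl : sl with
  | nil => simp
  | cons y ys =>
    have hne : sl ≠ [] := by rw [hsl]; simp
    rw [← hsl, PySem.List.pyGet?_neg_one, List.getLast?_eq_some_getLast hne]
    have hc := h _ (List.getLast_mem hne)
    rcases pvKey_cases (sl.getLast hne) with ⟨_, _, _, hnm⟩ | ⟨o', _, hcontrue, _, _, _, _⟩
    · simp [hnm]
    · rw [hc] at hcontrue; simp at hcontrue

lemma pvLoop_eq :
    ∀ (rest pre : List Char),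
      (∀ x ∈ pvNorm pre, pvPAIRS.contains x = false) →
      pvALoop (pre ++ rest) (PySem.List.enumerate rest (pre.length : Int)) =
        pvBLoop (pvNorm pre) rest := by
  intro rest
  induction rest with
  | nil =>
    intro pre _
    simp [PySem.List.enumerate, pvALoop, pvBLoop]
  | cons c rest IH =>
    intro pre h
    rw [PySem.List.enumerate_cons]
    have hslice :
        PySem.List.slice (pre ++ c :: rest) none (some ((pre.length : Int) + 1)) = pre ++ [c] := by
      have hcast : ((pre.length : Int) + 1) = ((pre.length + 1 : Nat) : Int) := by push_cast; ring
      rw [hcast, PySem.List.slice_to_natCast]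
      have ht : (pre ++ c :: rest).take (pre.length + 1) = pre ++ (c :: rest).take 1 :=
        List.take_length_add_append 1
      simpa using ht
    have hred : pvReduce (PySem.List.slice (pre ++ c :: rest) none (some ((pre.length : Int) + 1))) =
        pvStep (pvNorm pre) c := by
      rw [hslice, pvReduce_eq_norm, pvNorm_append_one]
    have hIH : ∀ st : List Char,
        pvNorm (pre ++ [c]) = st →
        (∀ x ∈ st, pvPAIRS.contains x = false) →
        pvALoop (pre ++ c :: rest) (PySem.List.enumerate rest ((pre.length : Int) + 1)) =
          pvBLoop st rest := by
      intro st hst hinv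
      have := IH (pre ++ [c]) (by rw [hst]; exact hinv)
      rw [hst] at this
      have hlen : (((pre ++ [c]).length : Nat) : Int) = (pre.length : Int) + 1 := by
        simp
      rw [hlen] at this
      simpa [List.append_assoc] using this
    rcases pvKey_cases c with ⟨hn, hcont, hrightc, hnm⟩ | ⟨o, hc, hcont, hrightc, hm, hpam, ho⟩
    · -- c is not a closing bracket: A skips it, B pushes it
      have hA : pvALoop (pre ++ c :: rest)
            (((pre.length : Int), c) :: PySem.List.enumerate rest ((pre.length : Int) + 1)) =
          pvALoop (pre ++ c :: rest) (PySem.List.enumerate rest ((pre.length : Int) + 1)) := by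
        rw [pvALoop, if_neg (by simp [hnm])]
      have hB : pvBLoop (pvNorm pre) (c :: rest) = pvBLoop (pvNorm pre ++ [c]) rest := by
        rw [pvBLoop, if_neg (by simp [hcont])]
      rw [hA, hB]
      exact hIH (pvNorm pre ++ [c])
        (by rw [pvNorm_append_one]; exact pvStep_none _ c hn)
        (by intro x hx
            rcases List.mem_append.mp hx with hx | hx
            · exact h x hx
            · simp at hx; subst hx; exact hcont)
    · -- c is a closing bracket
      by_cases hl : (pvNorm pre).getLast? = some o
      · -- matching open on top: A's reduced slice ends in no closing bracket, B pops
        have hpop : pvStep (pvNorm pre) c = (pvNorm pre).dropLast := by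
          rw [pvStep_some _ _ _ hc, if_pos hl]
        have hinv : ∀ x ∈ (pvNorm pre).dropLast, pvPAIRS.contains x = false :=
          fun x hx => h x ((List.dropLast_sublist _).mem hx)
        have hA : pvALoop (pre ++ c :: rest)
              (((pre.length : Int), c) :: PySem.List.enumerate rest ((pre.length : Int) + 1)) =
            pvALoop (pre ++ c :: rest) (PySem.List.enumerate rest ((pre.length : Int) + 1)) := by
          rw [pvALoop]
          rw [if_pos (by simp [hm])]
          simp only [hred, hpop]
          have hAc := pvNoClose ((pvNorm pre).dropLast) hinv
          rw [if_neg (fun hx => by rw [hAc] at hx; exact Bool.noConfusion hx)]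
        have hne : pvNorm pre ≠ [] := by
          intro hnil; rw [hnil] at hl; simp at hl
        have hB : pvBLoop (pvNorm pre) (c :: rest) = pvBLoop ((pvNorm pre).dropLast) rest := by
          rw [pvBLoop, if_pos (by simp [hcont]),
            if_pos (by simp [hl, hc, hne])]
        rw [hA, hB]
        exact hIH ((pvNorm pre).dropLast) (by rw [pvNorm_append_one, hpop]) hinv
      · -- mismatch (or empty stack): both return the char
        have hpush : pvStep (pvNorm pre) c = pvNorm pre ++ [c] := by
          rw [pvStep_some _ _ _ hc, if_neg hl]
        have hA : pvALoop (pre ++ c :: rest)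
              (((pre.length : Int), c) :: PySem.List.enumerate rest ((pre.length : Int) + 1)) =
            String.ofList [c] := by
          rw [pvALoop]
          rw [if_pos (by simp [hm])]
          simp only [hred, hpush]
          rw [if_pos ?_]
          rw [PySem.List.pyGet?_neg_one, List.getLast?_concat]
          simp [hm]
        have hB : pvBLoop (pvNorm pre) (c :: rest) = String.ofList [c] := by
          rw [pvBLoop, if_pos (by simp [hcont]), if_neg ?_]
          rw [hc]
          cases hg : (pvNorm pre).getLast? with
          | none => simp
          | some y =>
            have hy : y ≠ o := fun hyo => hl (by rw [hg, hyo])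
            simp [hy]
        rw [hA, hB]

-- ===== VERDICT (by name: the statement is the Claim_ definition above) =====
theorem find_illegal_chacters_spec : Claim_equal_find_illegal_chacters := by
  intro line _
  unfold Spec_find_illegal_chacters find_illegal_chacters find_illegal_chacters_alt
  have := pvLoop_eq line.toList [] (by simp [pvNorm])
  simpa [pvNorm] using this
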